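-- pv_equiv track=rewrite | github.com/JMittelbach/scGIP-Lab | scripts/check_experiment_1_readiness.py | detect_label_candidates
-- ===== SOURCE A (Python) =====
-- def detect_label_candidates(obs_cols: list[str]) -> list[str]:
--     priority = ["celltype.l2", "celltype.l1", "cell_type", "celltype", "annotation", "label"]
--     found: list[str] = []
--     for marker in priority:
--         for col in obs_cols:
--             if marker in col.lower() and col not in found:
--                 found.append(col)
--     return found
-- ===== SOURCE B (Python) =====
-- def detect_label_candidates(obs_cols: list[str]) -> list[str]:
--     priority = ["celltype.l2", "celltype.l1", "cell_type", "celltype", "annotation", "label"]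
--     buckets = [[] for _ in priority]
--     seen = set()
--     for col in obs_cols:
--         if col in seen:
--             continue
--         seen.add(col)
--         low = col.lower()
--         key = next((i for i, m in enumerate(priority) if m in low), None)
--         if key is not None:
--             buckets[key].append(col)
--     out = []
--     for b in buckets:
--         out.extend(b)
--     return out
-- ===== Notes on version B (the rewrite author's own statement) =====
-- stated objective: alternative
-- what changed: A scans obs_cols once per marker (6 passes), re-lowering every column each pass and testing membership in the growing found list; B makes a single pass over the columns with a seen set, lowers each column once, assigns it to the bucket of its first matching marker, and concatenates the 6 buckets.
import Mathlib
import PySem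

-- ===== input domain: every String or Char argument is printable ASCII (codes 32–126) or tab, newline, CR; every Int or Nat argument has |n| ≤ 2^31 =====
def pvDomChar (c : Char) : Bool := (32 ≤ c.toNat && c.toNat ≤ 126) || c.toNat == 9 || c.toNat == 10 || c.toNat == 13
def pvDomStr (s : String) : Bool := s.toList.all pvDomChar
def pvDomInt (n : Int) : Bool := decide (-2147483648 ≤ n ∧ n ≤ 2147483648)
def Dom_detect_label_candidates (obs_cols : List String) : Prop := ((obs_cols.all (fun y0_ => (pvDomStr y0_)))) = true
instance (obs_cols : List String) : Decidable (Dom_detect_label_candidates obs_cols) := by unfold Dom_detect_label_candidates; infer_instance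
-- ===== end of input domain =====

-- B replaces A's marker-outer re-scanning (6 passes over obs_cols, each re-lowering every
-- column and testing membership in the growing `found` list) by a single column-outer pass
-- with a `seen` set and per-marker buckets concatenated at the end; return values are equal.

-- the priority marker list (the same literal both Python versions hard-code)
def pvPriority : List String :=
  ["celltype.l2", "celltype.l1", "cell_type", "celltype", "annotation", "label"]

-- ===== PORT A =====
def detect_label_candidates (obs_cols : List String) : List String :=
  pvPriority.foldl (fun found marker =>
    obs_cols.foldl (fun found col =>
      if PySem.Str.isIn marker (PySem.Str.lower col) && !found.contains col then
        found ++ [col]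
      else found) found) []

-- ===== PORT B =====
def detect_label_candidates_alt (obs_cols : List String) : List String :=
  let st := obs_cols.foldl (fun (st : PySem.Set String × List (List String)) col =>
    if PySem.Set.contains st.1 col then st
    else
      let seen := PySem.Set.add st.1 col
      let low := PySem.Str.lower col
      match pvPriority.findIdx? (fun m => PySem.Str.isIn m low) with
      | some key => (seen, st.2.set key (st.2.getD key [] ++ [col]))
      | none => (seen, st.2))
    (PySem.Set.empty, pvPriority.map fun _ => [])
  st.2.foldl (fun out b => out ++ b) []

-- ===== PRECONDITION & SPEC =====
def Spec_detect_label_candidates (obs_cols : List String) (out : List String) : Prop := out = detect_label_candidates_alt obs_cols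
instance (obs_cols : List String) (out : List String) : Decidable (Spec_detect_label_candidates obs_cols out) := by unfold Spec_detect_label_candidates; infer_instance

-- ===== CLAIM (what is proved, stated in full; the proofs are below) =====
def Claim_equal_detect_label_candidates : Prop := ∀ (obs_cols : List String), Dom_detect_label_candidates obs_cols → Spec_detect_label_candidates obs_cols (detect_label_candidates obs_cols)

-- ===== LEMMAS AND PROOFS =====

-- the first priority index whose marker occurs in the lowered column, if any
def pvKey (c : String) : Option Nat :=
  pvPriority.findIdx? (fun m => PySem.Str.isIn m (PySem.Str.lower c))

-- the columns of xs whose key is k, first occurrences only, skipping members of f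
def pvPick (k : Nat) : List String → List String → List String
  | [], _ => []
  | c :: xs, f => if pvKey c = some k ∧ c ∉ f then c :: pvPick k xs (f ++ [c]) else pvPick k xs f

lemma pvPick_mem (k : Nat) (xs : List String) (f : List String) (c : String) :
    (c ∈ pvPick k xs f ∨ c ∈ f) ↔ ((pvKey c = some k ∧ c ∈ xs) ∨ c ∈ f) := by
  induction xs generalizing f with
  | nil => simp [pvPick]
  | cons d xs ih =>
    by_cases h : pvKey d = some k ∧ d ∉ f
    · simp only [pvPick, if_pos h, List.mem_cons]
      constructor
      · rintro (⟨rfl | hc⟩ | hf)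
        · exact Or.inl ⟨h.1, Or.inl rfl⟩
        · rcases (ih (f ++ [d])).mp (Or.inl hc) with ⟨hk, hm⟩ | hf'
          · exact Or.inl ⟨hk, Or.inr hm⟩
          · rcases List.mem_append.mp hf' with hf'' | hd
            · exact Or.inr hf''
            · exact Or.inl ⟨List.mem_singleton.mp hd ▸ h.1, Or.inl (List.mem_singleton.mp hd)⟩
        · exact Or.inr hf
      · rintro (⟨hk, rfl | hm⟩ | hf)
        · exact Or.inl (Or.inl rfl)
        · rcases (ih (f ++ [d])).mpr (Or.inl ⟨hk, hm⟩) with hc | hf'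
          · exact Or.inl (Or.inr hc)
          · rcases List.mem_append.mp hf' with hf'' | hd
            · exact Or.inr hf''
            · exact Or.inl (Or.inl (List.mem_singleton.mp hd))
        · exact Or.inr hf
    · simp only [pvPick, if_neg h]
      rw [ih f]
      constructor
      · rintro (⟨hk, hm⟩ | hf)
        · exact Or.inl ⟨hk, List.mem_cons_of_mem _ hm⟩
        · exact Or.inr hf
      · rintro (⟨hk, hm⟩ | hf)
        · rcases List.mem_cons.mp hm with rfl | hm'
          · rcases not_and_or.mp h with h' | h'
            · exact absurd hk h'
            · exact Or.inr (not_not.mp h')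
          · exact Or.inl ⟨hk, hm'⟩
        · exact Or.inr hf

lemma pvPick_mem_nil (k : Nat) (xs : List String) (c : String) :
    c ∈ pvPick k xs [] ↔ (pvKey c = some k ∧ c ∈ xs) := by
  have := pvPick_mem k xs [] c
  simpa using this

-- pvPick depends on f only through membership of key-k elements
lemma pvPick_congr (k : Nat) (xs : List String) (f f' : List String)
    (h : ∀ c, pvKey c = some k → (c ∈ f ↔ c ∈ f')) :
    pvPick k xs f = pvPick k xs f' := by
  induction xs generalizing f f' with
  | nil => rfl
  | cons d xs ih =>
    by_cases hd : pvKey d = some k ∧ d ∉ f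
    · have hd' : pvKey d = some k ∧ d ∉ f' := ⟨hd.1, fun hm => hd.2 ((h d hd.1).mpr hm)⟩
      simp only [pvPick, if_pos hd, if_pos hd']
      refine congrArg _ (ih (f ++ [d]) (f' ++ [d]) ?_)
      intro c hc
      simp only [List.mem_append, List.mem_singleton]
      rw [h c hc]
    · have hdn : ¬(pvKey d = some k ∧ d ∉ f') := by
        rintro ⟨hk, hn⟩
        exact hd ⟨hk, fun hm => hn ((h d hk).mp hm)⟩
      simp only [pvPick, if_neg hd, if_neg hdn]
      exact ih f f' h

lemma pvPick_append (k : Nat) (xs ys : List String) (f : List String) :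
    pvPick k (xs ++ ys) f = pvPick k xs f ++ pvPick k ys (f ++ pvPick k xs f) := by
  induction xs generalizing f with
  | nil => simp [pvPick]
  | cons d xs ih =>
    by_cases hd : pvKey d = some k ∧ d ∉ f
    · simp only [List.cons_append, pvPick, if_pos hd, ih (f ++ [d]), List.append_assoc,
        List.nil_append]
    · simp only [List.cons_append, pvPick, if_neg hd, ih f]

-- bucket k: the key-k columns of obs_cols, first occurrences, in order
def pvBucket (obs_cols : List String) (k : Nat) : List String := pvPick k obs_cols []

-- ===== A side =====

lemma pvKey_eq_some_iff (c : String) (k : Nat) (hk : k < pvPriority.length) :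
    pvKey c = some k ↔
      (PySem.Str.isIn (pvPriority[k]) (PySem.Str.lower c) = true ∧
       ∀ j (hj : j < k), ¬ PySem.Str.isIn (pvPriority[j]'(by omega)) (PySem.Str.lower c) = true) := by
  unfold pvKey
  rw [List.findIdx?_eq_some_iff_getElem]
  constructor
  · rintro ⟨h, h1, h2⟩; exact ⟨h1, fun j hj => h2 j hj⟩
  · rintro ⟨h1, h2⟩; exact ⟨hk, h1, fun j hj => h2 j hj⟩

-- A's inner loop over obs_cols for marker number k
lemma pvInnerA (k : Nat) (hk : k < pvPriority.length) :
    ∀ (xs found : List String),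
      (∀ c ∈ xs, (∃ j, ∃ hj : j < k, PySem.Str.isIn (pvPriority[j]'(by omega)) (PySem.Str.lower c) = true) → c ∈ found) →
      xs.foldl (fun found col =>
        if PySem.Str.isIn (pvPriority[k]) (PySem.Str.lower col) && !found.contains col then
          found ++ [col]
        else found) found = found ++ pvPick k xs found := by
  intro xs
  induction xs with
  | nil => intro found _; simp [pvPick]
  | cons c xs ih =>
    intro found hH
    by_cases hc : PySem.Str.isIn (pvPriority[k]) (PySem.Str.lower c) = true ∧ c ∉ found
    · have hkey : pvKey c = some k := by
        rw [pvKey_eq_some_iff c k hk]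
        exact ⟨hc.1, fun j hj hIn => hc.2 (hH c List.mem_cons_self ⟨j, hj, hIn⟩)⟩
      have hcond : (PySem.Str.isIn (pvPriority[k]) (PySem.Str.lower c) && !found.contains c) = true := by
        simp only [Bool.and_eq_true]
        exact ⟨hc.1, by simp [List.contains_eq_mem, hc.2]⟩
      rw [List.foldl_cons, if_pos hcond]
      rw [ih (found ++ [c]) (fun d hd hex => List.mem_append_left _ (hH d (List.mem_cons_of_mem _ hd) hex))]
      show _ = found ++ pvPick k (c :: xs) found
      simp only [pvPick]
      rw [if_pos ⟨hkey, hc.2⟩]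
      simp
    · have hcond : ¬ ((PySem.Str.isIn (pvPriority[k]) (PySem.Str.lower c) && !found.contains c) = true) := by
        intro hx
        rw [Bool.and_eq_true] at hx
        exact hc ⟨hx.1, by simpa [List.contains_eq_mem] using hx.2⟩
      have hnkey : ¬(pvKey c = some k ∧ c ∉ found) := by
        rintro ⟨hkey, hnf⟩
        exact hc ⟨((pvKey_eq_some_iff c k hk).mp hkey).1, hnf⟩
      rw [List.foldl_cons, if_neg hcond]
      rw [ih found (fun d hd hex => hH d (List.mem_cons_of_mem _ hd) hex)]
      show _ = found ++ pvPick k (c :: xs) found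
      simp only [pvPick]
      rw [if_neg hnkey]

-- membership of the first k buckets
lemma pvMem_prefix (obs_cols : List String) (k : Nat) (c : String) :
    c ∈ (List.range k).flatMap (pvBucket obs_cols) ↔
      (c ∈ obs_cols ∧ ∃ j, j < k ∧ pvKey c = some j) := by
  simp only [List.mem_flatMap, List.mem_range, pvBucket, pvPick_mem_nil]
  constructor
  · rintro ⟨j, hj, hk, hm⟩; exact ⟨hm, j, hj, hk⟩
  · rintro ⟨hm, j, hj, hk⟩; exact ⟨j, hj, hk, hm⟩

lemma pvOuterA (obs_cols : List String) :
    ∀ (n : Nat), n ≤ pvPriority.length →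
      (pvPriority.drop (pvPriority.length - n)).foldl (fun found marker =>
        obs_cols.foldl (fun found col =>
          if PySem.Str.isIn marker (PySem.Str.lower col) && !found.contains col then
            found ++ [col]
          else found) found)
        ((List.range (pvPriority.length - n)).flatMap (pvBucket obs_cols))
      = (List.range pvPriority.length).flatMap (pvBucket obs_cols) := by
  intro n
  induction n with
  | zero => intro _; simp
  | succ n ih =>
    intro hn
    set k := pvPriority.length - (n + 1) with hkdef
    have hk : k < pvPriority.length := by omega
    rw [List.drop_eq_getElem_cons hk, List.foldl_cons]
    have hfound := pvInnerA k hk obs_cols ((List.range k).flatMap (pvBucket obs_cols)) ?_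
    · rw [hfound]
      have hpick : pvPick k obs_cols ((List.range k).flatMap (pvBucket obs_cols)) = pvBucket obs_cols k := by
        refine pvPick_congr k obs_cols _ [] ?_
        intro c hkey
        simp only [List.not_mem_nil, iff_false]
        rw [pvMem_prefix]
        rintro ⟨_, j, hj, hkey'⟩
        rw [hkey] at hkey'
        simp only [Option.some.injEq] at hkey'
        omega
      rw [hpick]
      have hsucc : (List.range k).flatMap (pvBucket obs_cols) ++ pvBucket obs_cols k
          = (List.range (k + 1)).flatMap (pvBucket obs_cols) := by
        rw [List.range_succ, List.flatMap_append]
        simp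
      rw [hsucc]
      have : pvPriority.length - n = k + 1 := by omega
      rw [← this]
      exact ih (by omega)
    · intro c hc hex
      rw [pvMem_prefix]
      rcases hex with ⟨j, hj, hIn⟩
      -- some marker below k matches c, hence pvKey c = some j' with j' ≤ j < k
      have hne : pvKey c ≠ none := by
        unfold pvKey
        rw [Ne, List.findIdx?_eq_none_iff]
        push Not
        exact ⟨pvPriority[j]'(by omega), List.getElem_mem _, by simpa using hIn⟩
      rcases Option.ne_none_iff_exists'.mp hne with ⟨j', hj'⟩
      have hj'k : j' < k := by
        rcases (List.findIdx?_eq_some_iff_getElem.mp hj') with ⟨hlt, _, hmin⟩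
        by_contra hge
        exact hmin j (by omega) hIn
      exact ⟨hc, j', hj'k, hj'⟩

lemma pvA_eq (obs_cols : List String) :
    detect_label_candidates obs_cols = (List.range pvPriority.length).flatMap (pvBucket obs_cols) := by
  have := pvOuterA obs_cols pvPriority.length (le_refl _)
  simpa [detect_label_candidates] using this

-- ===== B side =====

lemma pvKey_lt (c : String) (k : Nat) (h : pvKey c = some k) : k < pvPriority.length := by
  rcases List.findIdx?_eq_some_iff_getElem.mp h with ⟨hlt, _⟩
  exact hlt

lemma pvPick_snoc (k : Nat) (p : List String) (c : String) :
    pvPick k (p ++ [c]) [] =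
      pvPick k p [] ++ (if pvKey c = some k ∧ c ∉ p then [c] else []) := by
  rw [pvPick_append]
  congr 1
  simp only [pvPick, List.nil_append]
  by_cases h : pvKey c = some k ∧ c ∉ pvPick k p []
  · rw [if_pos h]
    have : c ∉ p := by
      intro hp
      exact h.2 ((pvPick_mem_nil k p c).mpr ⟨h.1, hp⟩)
    rw [if_pos ⟨h.1, this⟩]
  · rw [if_neg h]
    rcases not_and_or.mp h with h' | h'
    · rw [if_neg (fun hx => h' hx.1)]
    · have hcp : c ∈ pvPick k p [] := not_not.mp h'
      have := (pvPick_mem_nil k p c).mp hcp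
      rw [if_neg (fun hx => hx.2 this.2)]

lemma pvInnerB :
    ∀ (xs p : List String),
      xs.foldl (fun (st : PySem.Set String × List (List String)) col =>
        if PySem.Set.contains st.1 col then st
        else
          let seen := PySem.Set.add st.1 col
          let low := PySem.Str.lower col
          match pvPriority.findIdx? (fun m => PySem.Str.isIn m low) with
          | some key => (seen, st.2.set key (st.2.getD key [] ++ [col]))
          | none => (seen, st.2))
        (PySem.Set.ofList p, (List.range pvPriority.length).map (pvBucket p))
      = (PySem.Set.ofList (p ++ xs), (List.range pvPriority.length).map (pvBucket (p ++ xs))) := by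
  intro xs
  induction xs with
  | nil => intro p; simp
  | cons c xs ih =>
    intro p
    rw [List.foldl_cons]
    have hstep : (if PySem.Set.contains (PySem.Set.ofList p) c then (PySem.Set.ofList p, (List.range pvPriority.length).map (pvBucket p))
        else
          let seen := PySem.Set.add (PySem.Set.ofList p) c
          let low := PySem.Str.lower c
          match pvPriority.findIdx? (fun m => PySem.Str.isIn m low) with
          | some key => (seen, ((List.range pvPriority.length).map (pvBucket p)).set key (((List.range pvPriority.length).map (pvBucket p)).getD key [] ++ [c]))
          | none => (seen, (List.range pvPriority.length).map (pvBucket p)))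
        = (PySem.Set.ofList (p ++ [c]), (List.range pvPriority.length).map (pvBucket (p ++ [c]))) := by
      have hofl : PySem.Set.ofList (p ++ [c]) = PySem.Set.add (PySem.Set.ofList p) c := by
        simp [PySem.Set.ofList_eq_foldl, List.foldl_append]
      by_cases hmem : c ∈ p
      · have hcont : PySem.Set.contains (PySem.Set.ofList p) c = true :=
          (PySem.Set.contains_iff _ _).mpr ((PySem.Set.mem_ofList p c).mpr hmem)
        rw [if_pos hcont]
        have h1 : PySem.Set.ofList (p ++ [c]) = PySem.Set.ofList p := by
          rw [hofl]
          unfold PySem.Set.add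
          rw [if_pos hcont]
        have h2 : ∀ i, pvBucket (p ++ [c]) i = pvBucket p i := by
          intro i
          have hnc : ¬ (pvKey c = some i ∧ c ∉ p) := fun hx => hx.2 hmem
          unfold pvBucket
          rw [pvPick_snoc, if_neg hnc, List.append_nil]
        rw [h1]
        exact congrArg _ (List.map_congr_left (fun i _ => (h2 i).symm))
      · have hcont : PySem.Set.contains (PySem.Set.ofList p) c = false :=
          Bool.eq_false_iff.mpr (fun h => hmem ((PySem.Set.mem_ofList p c).mp ((PySem.Set.contains_iff _ _).mp h)))
        rw [if_neg (by simpa using hmem)]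
        have hseen : PySem.Set.add (PySem.Set.ofList p) c = PySem.Set.ofList (p ++ [c]) := by
          rw [hofl]
        cases hkey : pvPriority.findIdx? (fun m => PySem.Str.isIn m (PySem.Str.lower c)) with
        | none =>
          simp only [hkey]
          have hnone : pvKey c = none := hkey
          have h2 : ∀ i, pvBucket (p ++ [c]) i = pvBucket p i := by
            intro i
            have hnc : ¬ (pvKey c = some i ∧ c ∉ p) := by
              rintro ⟨hk1, -⟩
              rw [hnone] at hk1
              simp at hk1
            unfold pvBucket
            rw [pvPick_snoc, if_neg hnc, List.append_nil]
          rw [hseen]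
          exact congrArg _ (List.map_congr_left (fun i _ => (h2 i).symm))
        | some i0 =>
          simp only [hkey]
          have hkc : pvKey c = some i0 := hkey
          have hi0 : i0 < pvPriority.length := pvKey_lt c i0 hkc
          have hgetD : ((List.range pvPriority.length).map (pvBucket p)).getD i0 [] = pvBucket p i0 := by
            simp [List.getD_eq_getElem?_getD, hi0]
          rw [hseen, hgetD]
          refine congrArg _ ?_
          apply List.ext_getElem
          · simp
          · intro j hj1 hj2
            have hj : j < pvPriority.length := by simpa using hj2
            simp only [List.getElem_set, List.getElem_map, List.getElem_range]
            by_cases hji : i0 = j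
            · subst hji
              rw [if_pos rfl]
              unfold pvBucket
              rw [pvPick_snoc, if_pos ⟨hkc, hmem⟩]
            · rw [if_neg hji]
              unfold pvBucket
              have hnc : ¬ (pvKey c = some j ∧ c ∉ p) := by
                rintro ⟨hk2, -⟩
                rw [hkc] at hk2
                exact hji (by injection hk2)
              rw [pvPick_snoc, if_neg hnc, List.append_nil]
    rw [hstep]
    have := ih (p ++ [c])
    rw [this]
    simp
  

lemma pvB_eq (obs_cols : List String) :
    detect_label_candidates_alt obs_cols = (List.range pvPriority.length).flatMap (pvBucket obs_cols) := by
  simp only [detect_label_candidates_alt]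
  have h0 : ((PySem.Set.empty : PySem.Set String), pvPriority.map (fun _ => ([] : List String)))
      = (PySem.Set.ofList ([] : List String), (List.range pvPriority.length).map (pvBucket ([] : List String))) := by
    decide
  rw [h0]
  have h1 := pvInnerB obs_cols []
  simp only [List.nil_append] at h1
  rw [h1]
  have h2 : ∀ (l : List (List String)), List.foldl (fun out b => out ++ b) ([] : List String) l = l.flatten := by
    intro l
    simpa using PySem.List.foldl_append_eq_flatMap (fun b : List String => b) l []
  rw [h2, ← List.flatMap_def]

-- ===== VERDICT (by name: the statement is the Claim_ definition above) =====
theorem detect_label_candidates_spec : Claim_equal_detect_label_candidates := by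
  intro obs_cols _
  unfold Spec_detect_label_candidates
  rw [pvA_eq, pvB_eq]
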